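-- pv_equiv track=rewrite | github.com/momstouch/programming | exhaustive_search/mock_test.py | solution
-- ===== SOURCE A (Python) =====
-- import operator
--
-- def solution(answers):
--     n = len(answers)
--     loosers =[
--             [1, 2, 3, 4, 5],
--             [2, 1, 2, 3, 2, 4, 2, 5],
--             [3, 3, 1, 1, 2, 2, 4, 4, 5, 5]
--             ]
--     result = []
--     cutline = 0
--     for idx, looser in enumerate(loosers, start = 1):
--         mult = 1 if n <= len(looser) else int(n / len(looser)) + 1
--         result.append([idx, sum([x == y for x, y in zip(answers, looser * mult)])])
--         if cutline < result[-1][1]: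
--             cutline = result[-1][1]
--
--     result.sort(
--             reverse = True,
--             key = operator.itemgetter(1)
--             )
--
--     return [rows[0] for rows in result if rows[1] == cutline]
-- ===== SOURCE B (Python) =====
-- def _stride_count(xs, v, start, step):
--     c = 0
--     for i in range(start, len(xs), step):
--         if xs[i] == v:
--             c += 1
--     return c
--
--
-- def solution(answers):
--     patterns = ([1, 2, 3, 4, 5],
--                 [2, 1, 2, 3, 2, 4, 2, 5],
--                 [3, 3, 1, 1, 2, 2, 4, 4, 5, 5])
--     scores = [sum(_stride_count(answers, v, j, len(p)) for j, v in enumerate(p))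
--               for p in patterns]
--     best = max(scores)
--     return [k for k, s in enumerate(scores, 1) if s == best]
-- ===== Notes on version B (the rewrite author's own statement) =====
-- stated objective: alternative
-- what changed: B traverses pattern-major: for each pattern position j it counts hits over indices range(j, n, len(p)), sums the per-position counts, and filters 1-based indices equal to the max - dropping A's pattern replication, elementwise zip comparison pass, and the reverse stable sort.
import Mathlib
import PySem

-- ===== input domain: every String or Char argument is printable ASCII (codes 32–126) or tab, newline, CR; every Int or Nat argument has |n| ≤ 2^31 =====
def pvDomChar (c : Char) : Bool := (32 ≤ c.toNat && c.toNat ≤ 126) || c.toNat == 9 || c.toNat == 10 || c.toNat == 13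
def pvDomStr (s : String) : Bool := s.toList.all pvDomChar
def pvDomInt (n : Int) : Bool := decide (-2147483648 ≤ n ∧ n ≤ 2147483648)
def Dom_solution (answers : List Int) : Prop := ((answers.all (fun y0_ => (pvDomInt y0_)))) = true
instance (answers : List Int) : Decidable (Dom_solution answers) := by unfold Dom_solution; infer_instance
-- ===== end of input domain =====

-- B replaces A's pattern replication + zip comparison pass + reverse stable sort by a
-- pattern-major traversal: per pattern position j it counts hits over the strided
-- segment answers[j:] stepping by the pattern length, then filters indices at the max
-- (alternative decomposition, same O(n) comparison count).

-- ===== PORT A =====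
-- Python `looser * mult` (list repetition)
def repList (p : List Int) : Nat → List Int
  | 0 => []
  | k + 1 => p ++ repList p k

def solution (answers : List Int) : List Int :=
  let n := answers.length
  let loosers : List (List Int) :=
    [[1, 2, 3, 4, 5],
     [2, 1, 2, 3, 2, 4, 2, 5],
     [3, 3, 1, 1, 2, 2, 4, 4, 5, 5]]
  -- loop over enumerate(loosers, start=1), state = (result, cutline)
  -- `int(n / len(looser))` truncates toward zero; n ≥ 0 so it equals Nat division (exact here)
  let st :=
    (PySem.List.enumerate loosers 1).foldl
      (fun (st : List (Int × Int) × Int) (pr : Int × List Int) =>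
        let mult := if n ≤ pr.2.length then 1 else n / pr.2.length + 1
        let score := ((answers.zip (repList pr.2 mult)).map
          (fun xy => if xy.1 = xy.2 then (1 : Int) else 0)).sum
        let result := st.1 ++ [(pr.1, score)]
        let cutline := if st.2 < score then score else st.2
        (result, cutline))
      ([], 0)
  let res := PySem.List.sorted st.1 (fun r => r.2) true
  (res.filter (fun r => r.2 == st.2)).map (fun r => r.1)

-- ===== PORT B =====
-- _stride_count(xs, v, start, step): c = 0; for i in range(start, len(xs), step): if xs[i]==v: c += 1
-- (i stays in range, so xs[i] never raises; pyGetD is exact there)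
def strideR (xs : List Int) (v : Int) (start : Int) (step : Int) : Int :=
  (PySem.List.pyRange start (xs.length : Int) step).foldl
    (fun c i => if PySem.List.pyGetD xs i 0 = v then c + 1 else c) 0

-- sum(_stride_count(answers, v, j, len(p)) for j, v in enumerate(p))
def scoreB (answers p : List Int) : Int :=
  ((PySem.List.enumerate p 0).map
    (fun jv => strideR answers jv.2 jv.1 (p.length : Int))).sum

def solution_alt (answers : List Int) : List Int :=
  let scores :=
    [[1, 2, 3, 4, 5],
     [2, 1, 2, 3, 2, 4, 2, 5],
     [3, 3, 1, 1, 2, 2, 4, 4, 5, 5]].map (fun p => scoreB answers p)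
  let best := (PySem.List.max? scores (fun y => y)).getD 0   -- scores is nonempty, max(scores) never raises
  ((PySem.List.enumerate scores 1).filter (fun p => p.2 == best)).map (fun p => p.1)

-- ===== PRECONDITION & SPEC =====
def Spec_solution (answers : List Int) (out : List Int) : Prop := out = solution_alt answers
instance (answers : List Int) (out : List Int) : Decidable (Spec_solution answers out) := by unfold Spec_solution; infer_instance

-- ===== CLAIM (what is proved, stated in full; the proofs are below) =====
def Claim_equal_solution : Prop := ∀ (answers : List Int), Dom_solution answers → Spec_solution answers (solution answers)

-- ===== LEMMAS AND PROOFS =====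

-- spec-side strided counter: counts head, then skips step-1 elements
def strideC (v : Int) (step : Nat) (c : Int) : List Int → Int
  | [] => c
  | a :: t => strideC v step (if a = v then c + 1 else c) (t.drop (step - 1))
  termination_by xs => xs.length
  decreasing_by simp

-- count of matches of xs against pattern p cycled, starting at index s
def cnt (p : List Int) : List Int → Nat → Int
  | [], _ => 0
  | a :: xs, s => (if a = p.getD (s % p.length) 0 then (1 : Int) else 0) + cnt p xs (s + 1)

theorem cnt_nonneg (p xs) : ∀ s, 0 ≤ cnt p xs s := by
  induction xs with
  | nil => intro s; simp [cnt]
  | cons a xs ih =>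
      intro s
      have := ih (s + 1)
      by_cases h : a = p.getD (s % p.length) 0 <;> simp [cnt, h] <;> omega

-- cnt only depends on the start index mod the pattern length
theorem cnt_add_len (p : List Int) : ∀ (xs : List Int) (s : Nat),
    cnt p xs (s + p.length) = cnt p xs s := by
  intro xs
  induction xs with
  | nil => intro s; simp [cnt]
  | cons a xs ih =>
      intro s
      simp only [cnt, Nat.add_mod_right]
      rw [show s + p.length + 1 = (s + 1) + p.length by omega, ih]

-- count of xs against a rotating queue q (compare with head, then rotate by one)
def cntq (q : List Int) : List Int → Int
  | [] => 0
  | a :: xs => (if a = q.headD 0 then (1 : Int) else 0) + cntq (q.drop 1 ++ q.take 1) xs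

theorem cntq_eq_cnt (p : List Int) : ∀ (xs : List Int) (s : Nat), s < p.length →
    cntq (p.drop s ++ p.take s) xs = cnt p xs s := by
  intro xs
  induction xs with
  | nil => intro s _; simp [cntq, cnt]
  | cons a xs ih =>
      intro s hs
      have hne : p.drop s ≠ [] := by
        intro h
        have := congrArg List.length h
        simp at this; omega
      obtain ⟨b, rest, hbr⟩ := List.exists_cons_of_ne_nil hne
      have hb : b = p.getD s 0 := by
        have h := (List.head?_drop : (p.drop s).head? = p[s]?)
        rw [hbr] at h
        simp only [List.head?_cons] at h
        simp [List.getD, ← h]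
      have hps : p[s]? = some b := by
        rw [hb, List.getD_eq_getElem _ _ hs]
        exact List.getElem?_eq_some_iff.mpr ⟨hs, rfl⟩
      have hrot : (p.drop s ++ p.take s).drop 1 ++ (p.drop s ++ p.take s).take 1
          = p.drop (s + 1) ++ p.take (s + 1) := by
        rw [hbr]
        have h1 : rest = p.drop (s + 1) := by
          have := congrArg List.tail hbr
          simpa [List.tail_drop] using this.symm
        rw [List.cons_append, List.drop_succ_cons, List.take_succ_cons,
          List.drop_zero, List.take_zero, List.append_assoc, h1, List.take_add_one, hps]
        simp
      have hhead : (p.drop s ++ p.take s).headD 0 = p.getD (s % p.length) 0 := by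
        rw [hbr, Nat.mod_eq_of_lt hs]
        simp [hb]
      simp only [cntq, cnt, hrot, hhead]
      by_cases hcase : s + 1 < p.length
      · rw [ih (s + 1) hcase]
      · have hEq : s + 1 = p.length := by omega
        have h0 : p.drop (s + 1) ++ p.take (s + 1) = p.drop 0 ++ p.take 0 := by
          simp [hEq]
        rw [h0, ih 0 (by omega), show s + 1 = 0 + p.length by omega, cnt_add_len]

-- unfolding equations for strideC (well-founded definition)
theorem strideC_nil (v : Int) (step : Nat) (c : Int) : strideC v step c [] = c := by
  rw [strideC.eq_def]

theorem strideC_cons (v : Int) (step : Nat) (c : Int) (a : Int) (t : List Int) :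
    strideC v step c (a :: t)
      = strideC v step (if a = v then c + 1 else c) (t.drop (step - 1)) := by
  rw [strideC.eq_def]

-- the accumulator of strideC shifts out
theorem strideC_shift (v : Int) (step : Nat) : ∀ (xs : List Int) (c : Int),
    strideC v step c xs = c + strideC v step 0 xs := by
  intro xs
  induction hn : xs.length using Nat.strong_induction_on generalizing xs with
  | _ n ih =>
    cases xs with
    | nil => intro c; simp [strideC_nil]
    | cons a t =>
        intro c
        have hlt : (t.drop (step - 1)).length < n := by
          simp at hn ⊢; omega
        rw [strideC_cons, strideC_cons, ih _ hlt _ rfl, ih _ hlt _ rfl (if a = v then 0 + 1 else 0)]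
        split <;> ring


-- range(a, b, s) with positive step: empty and cons forms
theorem pyRange_pos_nil (a b s : Int) (hs : 0 < s) (h : b ≤ a) :
    PySem.List.pyRange a b s = [] := by
  rw [PySem.List.pyRange_of_pos a b hs, if_neg (by omega)]
  simp

theorem pyRange_pos_cons (a b s : Int) (hs : 0 < s) (h : a < b) :
    PySem.List.pyRange a b s = a :: PySem.List.pyRange (a + s) b s := by
  rw [PySem.List.pyRange_of_pos a b hs, PySem.List.pyRange_of_pos (a + s) b hs, if_pos h]
  have hnum : (0 : Int) ≤ b - (a + s) + s - 1 := by omega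
  have hc : ((b - a + s - 1) / s).toNat = ((b - (a + s) + s - 1) / s).toNat + 1 := by
    have e : b - a + s - 1 = (b - (a + s) + s - 1) + 1 * s := by ring
    have h3 : 0 ≤ (b - (a + s) + s - 1) / s := Int.ediv_nonneg hnum (by omega)
    rw [e, Int.add_mul_ediv_right _ _ (by omega : s ≠ 0)]
    omega
  rw [hc]
  by_cases h2 : a + s < b
  · rw [if_pos h2, List.range_succ_eq_map, List.map_cons, List.map_map]
    refine congrArg₂ List.cons (by simp) ?_
    refine List.map_congr_left ?_
    intro k _
    simp only [Function.comp_apply]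
    push_cast
    ring
  · rw [if_neg h2]
    have h0 : (b - (a + s) + s - 1) / s = 0 := Int.ediv_eq_zero_of_lt hnum (by omega)
    rw [h0]
    simp

-- the accumulator of strideR's foldl shifts out
theorem strideR_shift (xs : List Int) (v : Int) : ∀ (l : List Int) (c : Int),
    l.foldl (fun c i => if PySem.List.pyGetD xs i 0 = v then c + 1 else c) c
      = c + l.foldl (fun c i => if PySem.List.pyGetD xs i 0 = v then c + 1 else c) 0 := by
  intro l
  induction l with
  | nil => intro c; simp
  | cons i l ih =>
      intro c
      simp only [List.foldl_cons]
      rw [ih, ih (if PySem.List.pyGetD xs i 0 = v then 0 + 1 else 0)]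
      split <;> ring

-- B's range-with-step count equals the spec-side strided counter
theorem strideR_eq (xs : List Int) (v : Int) (L : Nat) (hL : 0 < L) :
    ∀ (fuel j : Nat), xs.length ≤ j + fuel →
      strideR xs v (j : Int) (L : Int) = strideC v L 0 (xs.drop j) := by
  intro fuel
  induction fuel with
  | zero =>
      intro j hj
      rw [strideR, pyRange_pos_nil _ _ _ (by exact_mod_cast hL) (by exact_mod_cast hj)]
      simp [List.drop_eq_nil_of_le (by omega : xs.length ≤ j), strideC_nil]
  | succ fuel ih =>
      intro j hj
      by_cases hjn : j < xs.length
      · rw [strideR, pyRange_pos_cons _ _ _ (by exact_mod_cast hL) (by exact_mod_cast hjn),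
          List.foldl_cons, strideR_shift]
        have hcast : (j : Int) + (L : Int) = ((j + L : Nat) : Int) := by push_cast; ring
        rw [hcast,
          show (PySem.List.pyRange ((j + L : Nat) : Int) (xs.length : Int) (L : Int)).foldl
              (fun c i => if PySem.List.pyGetD xs i 0 = v then c + 1 else c) 0
            = strideR xs v ((j + L : Nat) : Int) (L : Int) from rfl,
          ih (j + L) (by omega),
          List.drop_eq_getElem_cons hjn, strideC_cons, strideC_shift,
          show (xs.drop (j + 1)).drop (L - 1) = xs.drop (j + L) from by
            rw [List.drop_drop]; congr 1; omega,
          show PySem.List.pyGetD xs (j : Int) 0 = xs[j] from by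
            rw [PySem.List.pyGetD_natCast, List.getD_eq_getElem _ _ hjn]]
        split
        · rw [strideC_shift v L (List.drop (j + L) xs) (0 + 1)]
          ring
        · ring
      · rw [strideR, pyRange_pos_nil _ _ _ (by exact_mod_cast hL) (by exact_mod_cast (by omega : xs.length ≤ j))]
        simp [List.drop_eq_nil_of_le (by omega : xs.length ≤ j), strideC_nil]

-- Int-argument wrapper for strideR_eq
theorem strideR_eq' (xs : List Int) (v : Int) (j L : Int) (hj : 0 ≤ j) (hL : 0 < L) :
    strideR xs v j L = strideC v L.toNat 0 (xs.drop j.toNat) := by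
  have h := strideR_eq xs v L.toNat (by omega) xs.length j.toNat (by omega)
  simpa [Int.toNat_of_nonneg hj, Int.toNat_of_nonneg hL.le] using h

-- per-pattern stride sums equal the rotating-queue count (periods 5, 8, 10)
theorem stride5 : ∀ (xs : List Int) (v0 v1 v2 v3 v4 : Int),
    strideC v0 5 0 xs + (strideC v1 5 0 (xs.drop 1) + (strideC v2 5 0 (xs.drop 2) +
      (strideC v3 5 0 (xs.drop 3) + strideC v4 5 0 (xs.drop 4))))
      = cntq [v0, v1, v2, v3, v4] xs := by
  intro xs
  induction xs with
  | nil => intro v0 v1 v2 v3 v4; simp [strideC_nil, cntq]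
  | cons a t ih =>
      intro v0 v1 v2 v3 v4
      have h0 : strideC v0 5 0 (a :: t)
          = (if a = v0 then (1 : Int) else 0) + strideC v0 5 0 (t.drop 4) := by
        rw [strideC_cons, strideC_shift]
        split <;> simp
      simp only [List.drop_succ_cons, cntq, List.headD, List.drop_one,
        List.take_succ_cons, List.take_zero, List.drop_zero, List.cons_append,
        List.nil_append] at *
      rw [h0, ← ih v1 v2 v3 v4 v0]
      ring_nf

theorem stride8 : ∀ (xs : List Int) (v0 v1 v2 v3 v4 v5 v6 v7 : Int),
    strideC v0 8 0 xs + (strideC v1 8 0 (xs.drop 1) + (strideC v2 8 0 (xs.drop 2) +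
      (strideC v3 8 0 (xs.drop 3) + (strideC v4 8 0 (xs.drop 4) +
      (strideC v5 8 0 (xs.drop 5) + (strideC v6 8 0 (xs.drop 6) +
      strideC v7 8 0 (xs.drop 7)))))))
      = cntq [v0, v1, v2, v3, v4, v5, v6, v7] xs := by
  intro xs
  induction xs with
  | nil => intro v0 v1 v2 v3 v4 v5 v6 v7; simp [strideC_nil, cntq]
  | cons a t ih =>
      intro v0 v1 v2 v3 v4 v5 v6 v7
      have h0 : strideC v0 8 0 (a :: t)
          = (if a = v0 then (1 : Int) else 0) + strideC v0 8 0 (t.drop 7) := by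
        rw [strideC_cons, strideC_shift]
        split <;> simp
      simp only [List.drop_succ_cons, cntq, List.headD, List.drop_one,
        List.take_succ_cons, List.take_zero, List.drop_zero, List.cons_append,
        List.nil_append] at *
      rw [h0, ← ih v1 v2 v3 v4 v5 v6 v7 v0]
      ring_nf

theorem stride10 : ∀ (xs : List Int) (v0 v1 v2 v3 v4 v5 v6 v7 v8 v9 : Int),
    strideC v0 10 0 xs + (strideC v1 10 0 (xs.drop 1) + (strideC v2 10 0 (xs.drop 2) +
      (strideC v3 10 0 (xs.drop 3) + (strideC v4 10 0 (xs.drop 4) +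
      (strideC v5 10 0 (xs.drop 5) + (strideC v6 10 0 (xs.drop 6) +
      (strideC v7 10 0 (xs.drop 7) + (strideC v8 10 0 (xs.drop 8) +
      strideC v9 10 0 (xs.drop 9)))))))))
      = cntq [v0, v1, v2, v3, v4, v5, v6, v7, v8, v9] xs := by
  intro xs
  induction xs with
  | nil => intro v0 v1 v2 v3 v4 v5 v6 v7 v8 v9; simp [strideC_nil, cntq]
  | cons a t ih =>
      intro v0 v1 v2 v3 v4 v5 v6 v7 v8 v9
      have h0 : strideC v0 10 0 (a :: t)
          = (if a = v0 then (1 : Int) else 0) + strideC v0 10 0 (t.drop 9) := by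
        rw [strideC_cons, strideC_shift]
        split <;> simp
      simp only [List.drop_succ_cons, cntq, List.headD, List.drop_one,
        List.take_succ_cons, List.take_zero, List.drop_zero, List.cons_append,
        List.nil_append] at *
      rw [h0, ← ih v1 v2 v3 v4 v5 v6 v7 v8 v9 v0]
      ring_nf

theorem repList_getD (p : List Int) (hp : p ≠ []) : ∀ (k j : Nat), j < k * p.length →
    (repList p k).getD j 0 = p.getD (j % p.length) 0 := by
  intro k
  induction k with
  | zero => intro j h; omega
  | succ k ih =>
      intro j h
      have hL : 0 < p.length := List.length_pos_iff.mpr hp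
      have e1 : (k + 1) * p.length = k * p.length + p.length := Nat.succ_mul k p.length
      by_cases hj : j < p.length
      · rw [repList, List.getD, List.getElem?_append_left hj,
          Nat.mod_eq_of_lt hj]; rfl
      · rw [repList, List.getD, List.getElem?_append_right (by omega)]
        have h1 : j - p.length < k * p.length := by omega
        rw [show ((repList p k)[j - p.length]?).getD 0
            = (repList p k).getD (j - p.length) 0 from rfl, ih _ h1,
          ← Nat.mod_eq_sub_mod (by omega)]

theorem repList_length (p : List Int) : ∀ k, (repList p k).length = k * p.length := by
  intro k
  induction k with
  | zero => simp [repList]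
  | succ k ih => simp [repList, ih, Nat.succ_mul]; ring

-- zip-sum against a supply whose j-th element is p[(s+j) % |p|] equals cnt
theorem zipsum_eq_cnt (p : List Int) :
    ∀ (xs ys : List Int) (s : Nat), xs.length ≤ ys.length →
    (∀ j, j < xs.length → ys.getD j 0 = p.getD ((s + j) % p.length) 0) →
    ((xs.zip ys).map (fun xy => if xy.1 = xy.2 then (1 : Int) else 0)).sum
      = cnt p xs s := by
  intro xs
  induction xs with
  | nil => intro ys s _ _; simp [cnt]
  | cons a xs ih =>
      intro ys s hlen hys
      cases ys with
      | nil => simp at hlen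
      | cons y ys =>
          have h0 : y = p.getD (s % p.length) 0 := by
            simpa [List.getD] using hys 0 (by simp)
          have hlen' : xs.length ≤ ys.length := by
            simpa using hlen
          have hys' : ∀ j, j < xs.length →
              ys.getD j 0 = p.getD ((s + 1 + j) % p.length) 0 := by
            intro j hj
            have := hys (j + 1) (by simp; omega)
            simpa [List.getD, Nat.add_assoc, Nat.add_comm, Nat.add_left_comm] using this
          simp only [List.zip_cons_cons, List.map_cons, List.sum_cons, cnt, ← h0]
          rw [ih ys (s + 1) hlen' hys']

-- A's per-pattern score equals cnt p answers 0
theorem scoreA_eq_cnt (p : List Int) (hp : p ≠ []) (answers : List Int) :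
    ((answers.zip (repList p (if answers.length ≤ p.length then 1
        else answers.length / p.length + 1))).map
      (fun xy => if xy.1 = xy.2 then (1 : Int) else 0)).sum
      = cnt p answers 0 := by
  set n := answers.length with hn
  set mult := if n ≤ p.length then 1 else n / p.length + 1 with hm
  have hL : 0 < p.length := List.length_pos_iff.mpr hp
  have hbound : n ≤ mult * p.length := by
    have hq : (n / p.length + 1) * p.length = p.length * (n / p.length) + p.length := by ring
    rw [hm]; split
    · omega
    · have := Nat.div_add_mod n p.length
      have := Nat.mod_lt n hL
      omega
  refine zipsum_eq_cnt p answers _ 0 ?_ ?_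
  · rw [repList_length]; exact hbound
  · intro j hj
    simpa using repList_getD p hp mult j (by omega)

-- B's per-pattern score equals cnt p answers 0 (periods 5, 8, 10)
theorem scoreB5 (answers : List Int) :
    scoreB answers [1, 2, 3, 4, 5] = cnt [1, 2, 3, 4, 5] answers 0 := by
  rw [← cntq_eq_cnt [1, 2, 3, 4, 5] answers 0 (by norm_num)]
  simp only [List.drop_zero, List.take_zero, List.append_nil]
  rw [← stride5]
  simp [scoreB, PySem.List.enumerate, strideR_eq', List.drop_one]

theorem scoreB8 (answers : List Int) :
    scoreB answers [2, 1, 2, 3, 2, 4, 2, 5] = cnt [2, 1, 2, 3, 2, 4, 2, 5] answers 0 := by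
  rw [← cntq_eq_cnt [2, 1, 2, 3, 2, 4, 2, 5] answers 0 (by norm_num)]
  simp only [List.drop_zero, List.take_zero, List.append_nil]
  rw [← stride8]
  simp [scoreB, PySem.List.enumerate, strideR_eq', List.drop_one]

theorem scoreB10 (answers : List Int) :
    scoreB answers [3, 3, 1, 1, 2, 2, 4, 4, 5, 5]
      = cnt [3, 3, 1, 1, 2, 2, 4, 4, 5, 5] answers 0 := by
  rw [← cntq_eq_cnt [3, 3, 1, 1, 2, 2, 4, 4, 5, 5] answers 0 (by norm_num)]
  simp only [List.drop_zero, List.take_zero, List.append_nil]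
  rw [← stride10]
  simp [scoreB, PySem.List.enumerate, strideR_eq', List.drop_one]

-- A's sorted+filter over three rows equals the plain enumerate filter
theorem filter3 (s1 s2 s3 : Int) :
    ((PySem.List.sorted [((1 : Int), s1), (2, s2), (3, s3)] (fun r => r.2) true).filter
        (fun r => r.2 == max (max s1 s2) s3)).map (fun r => r.1)
      = ((PySem.List.enumerate [s1, s2, s3] 1).filter
        (fun p => p.2 == max (max s1 s2) s3)).map (fun p => p.1) := by
  rw [PySem.List.sorted_rev_eq_foldl_insertBy]
  simp only [List.foldl, PySem.List.insertBy, PySem.List.enumerate, max_def]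
  split_ifs <;> simp_all [PySem.List.insertBy]
  all_goals (split_ifs <;>
    simp only [List.filter_cons, List.filter_nil, beq_iff_eq] <;>
    split_ifs <;> first | rfl | omega)

theorem solution_eq (answers : List Int) : solution answers = solution_alt answers := by
  have h1 : ([1, 2, 3, 4, 5] : List Int) ≠ [] := by simp
  have h2 : ([2, 1, 2, 3, 2, 4, 2, 5] : List Int) ≠ [] := by simp
  have h3 : ([3, 3, 1, 1, 2, 2, 4, 4, 5, 5] : List Int) ≠ [] := by simp
  set s1 := cnt [1, 2, 3, 4, 5] answers 0 with hs1
  set s2 := cnt [2, 1, 2, 3, 2, 4, 2, 5] answers 0 with hs2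
  set s3 := cnt [3, 3, 1, 1, 2, 2, 4, 4, 5, 5] answers 0 with hs3
  have n1 : 0 ≤ s1 := cnt_nonneg _ _ _
  have n2 : 0 ≤ s2 := cnt_nonneg _ _ _
  have n3 : 0 ≤ s3 := cnt_nonneg _ _ _
  have hB : solution_alt answers =
      ((PySem.List.enumerate [s1, s2, s3] 1).filter
        (fun p => p.2 == max (max s1 s2) s3)).map (fun p => p.1) := by
    simp only [solution_alt, List.map_cons, List.map_nil,
      scoreB5, scoreB8, scoreB10, ← hs1, ← hs2, ← hs3,
      PySem.List.max?_id_cons, List.foldl, Option.getD_some, max_def]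
  have hA : solution answers =
      ((PySem.List.sorted [((1 : Int), s1), (2, s2), (3, s3)] (fun r => r.2) true).filter
        (fun r => r.2 == max (max s1 s2) s3)).map (fun r => r.1) := by
    simp only [solution, PySem.List.enumerate, List.foldl,
      scoreA_eq_cnt _ h1, scoreA_eq_cnt _ h2, scoreA_eq_cnt _ h3, ← hs1, ← hs2, ← hs3]
    have hc : (if (if (if (0 : Int) < s1 then s1 else 0) < s2 then s2
        else if (0 : Int) < s1 then s1 else 0) < s3 then s3
        else if (if (0 : Int) < s1 then s1 else 0) < s2 then s2
        else if (0 : Int) < s1 then s1 else 0) = max (max s1 s2) s3 := by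
      simp only [max_def]; split_ifs <;> omega
    rw [hc]
    norm_num
  rw [hA, hB, filter3]

-- ===== VERDICT (by name: the statement is the Claim_ definition above) =====
theorem solution_spec : Claim_equal_solution := by
  intro answers _
  exact solution_eq answers
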